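-- pv_equiv track=rewrite | github.com/martenbeeg-sketch/mn-fibril-modeller-gemmi | mn_fibril_modeller_gemmi/core/pdb_io.py | _strip_secondary_structure_annotations
-- ===== SOURCE A (Python) =====
-- MMCIF_SS_PREFIXES = (
--     "_struct_conf.",
--     "_struct_conf_type.",
--     "_struct_sheet.",
--     "_struct_sheet_order.",
--     "_struct_sheet_range.",
--     "_pdbx_struct_sheet_hbond.",
-- )
--
-- def _strip_secondary_structure_annotations(structure_text: str, output_format: str) -> str:
--     if output_format == "pdb":
--         kept_lines = []
--         for line in structure_text.splitlines():
--             record = line[:6].strip()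
--             if record in {"HELIX", "SHEET", "TURN"}:
--                 continue
--             kept_lines.append(line)
--         return "\n".join(kept_lines) + ("\n" if structure_text.endswith("\n") else "")
--
--     lines = structure_text.splitlines()
--     kept_lines: list[str] = []
--     index = 0
--     while index < len(lines):
--         line = lines[index]
--         stripped = line.strip()
--         if stripped == "loop_":
--             header_index = index + 1
--             headers: list[str] = []
--             while header_index < len(lines) and lines[header_index].lstrip().startswith("_"):
--                 headers.append(lines[header_index].strip())
--                 header_index += 1
--             if headers and any(header.startswith(MMCIF_SS_PREFIXES) for header in headers):
--                 data_index = header_index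
--                 while data_index < len(lines):
--                     next_stripped = lines[data_index].strip()
--                     if next_stripped == "loop_" or lines[data_index].lstrip().startswith("_") or next_stripped.startswith("data_"):
--                         break
--                     data_index += 1
--                 index = data_index
--                 continue
--         if stripped.startswith(MMCIF_SS_PREFIXES):
--             index += 1
--             continue
--         kept_lines.append(line)
--         index += 1
--     return "\n".join(kept_lines) + ("\n" if structure_text.endswith("\n") else "")
-- ===== SOURCE B (Python) =====
-- MMCIF_SS_PREFIXES = (
--     "_struct_conf.",
--     "_struct_conf_type.",
--     "_struct_sheet.",
--     "_struct_sheet_order.",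
--     "_struct_sheet_range.",
--     "_pdbx_struct_sheet_hbond.",
-- )
--
--
-- def _is_header(line):
--     return line.lstrip().startswith("_")
--
--
-- def _is_boundary(line):
--     stripped = line.strip()
--     return stripped == "loop_" or _is_header(line) or stripped.startswith("data_")
--
--
-- def _strip_secondary_structure_annotations(structure_text: str, output_format: str) -> str:
--     lines = structure_text.splitlines()
--     tail = "\n" if structure_text.endswith("\n") else ""
--     if output_format == "pdb":
--         kept = [l for l in lines if l[:6].strip() not in {"HELIX", "SHEET", "TURN"}]
--         return "\n".join(kept) + tail
--     # Pass 1: group the lines into blocks (a 'loop_' opener with its headers and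
--     # data rows, or a singleton line).
--     blocks = []
--     i, n = 0, len(lines)
--     while i < n:
--         line = lines[i]
--         if line.strip() == "loop_":
--             j = i + 1
--             while j < n and _is_header(lines[j]):
--                 j += 1
--             k = j
--             while k < n and not _is_boundary(lines[k]):
--                 k += 1
--             blocks.append((line, lines[i + 1:j], lines[j:k]))
--             i = k
--         else:
--             blocks.append(line)
--             i += 1
--     # Pass 2: keep every block that is not secondary-structure related.
--     out = []
--     for block in blocks:
--         if isinstance(block, str):
--             if not block.strip().startswith(MMCIF_SS_PREFIXES):
--                 out.append(block)
--         else: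
--             opener, hdrs, rows = block
--             stripped_hdrs = [h.strip() for h in hdrs]
--             if stripped_hdrs and any(h.startswith(MMCIF_SS_PREFIXES) for h in stripped_hdrs):
--                 continue
--             out.append(opener)
--             out.extend(hdrs)
--             out.extend(rows)
--     return "\n".join(out) + tail
-- ===== Notes on version B (the rewrite author's own statement) =====
-- stated objective: alternative
-- what changed: The fused index-based while loop over mmCIF lines is replaced by a two-pass decomposition: first group the lines into blocks (a loop_ opener with its contiguous headers and data rows, or a singleton line), then filter whole blocks; the pdb branch becomes a plain list filter.
import Mathlib
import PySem

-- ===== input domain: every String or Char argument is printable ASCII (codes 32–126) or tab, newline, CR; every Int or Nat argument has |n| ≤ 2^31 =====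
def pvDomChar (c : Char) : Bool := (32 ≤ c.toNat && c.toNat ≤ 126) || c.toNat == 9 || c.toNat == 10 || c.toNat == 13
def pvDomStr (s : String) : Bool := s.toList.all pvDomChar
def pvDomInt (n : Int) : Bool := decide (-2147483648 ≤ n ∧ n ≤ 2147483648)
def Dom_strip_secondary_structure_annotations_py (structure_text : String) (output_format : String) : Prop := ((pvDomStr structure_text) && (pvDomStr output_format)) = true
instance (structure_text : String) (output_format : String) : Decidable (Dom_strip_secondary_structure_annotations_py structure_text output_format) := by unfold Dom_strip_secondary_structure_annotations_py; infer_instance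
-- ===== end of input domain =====

-- B re-groups the mmCIF lines into blocks first and then filters whole blocks
-- (a different decomposition of the same task); return values proved equal.

-- shared module-level constant (MMCIF_SS_PREFIXES) and the line tests both
-- Pythons perform verbatim
def pvSSPrefixes : List String :=
  ["_struct_conf.", "_struct_conf_type.", "_struct_sheet.",
   "_struct_sheet_order.", "_struct_sheet_range.", "_pdbx_struct_sheet_hbond."]

-- s.startswith(MMCIF_SS_PREFIXES)  (tuple argument = any of the prefixes)
def pvIsSS (s : String) : Bool := pvSSPrefixes.any (fun p => PySem.Str.startswith s p)

-- record in {"HELIX", "SHEET", "TURN"}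
def pvIsRecSS (record : String) : Bool := ["HELIX", "SHEET", "TURN"].contains record

-- line.lstrip().startswith("_")
def pvIsHeader (l : String) : Bool := PySem.Str.startswith (PySem.Str.lstrip l) "_"

-- next_stripped == "loop_" or line.lstrip().startswith("_") or next_stripped.startswith("data_")
def pvIsBoundary (l : String) : Bool :=
  PySem.Str.strip l == "loop_" || pvIsHeader l || PySem.Str.startswith (PySem.Str.strip l) "data_"

-- the two scans both Pythons run after a 'loop_' opener: the contiguous header
-- lines (A's first inner while loop / B's j scan), and everything up to the
-- next boundary line (A's data_index while loop / B's k scan)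
def pvHdrs (rest : List String) : List String := rest.takeWhile pvIsHeader
def pvRest1 (rest : List String) : List String := rest.dropWhile pvIsHeader
def pvRows (rest : List String) : List String := (pvRest1 rest).takeWhile (fun l => !pvIsBoundary l)
def pvRest2 (rest : List String) : List String := (pvRest1 rest).dropWhile (fun l => !pvIsBoundary l)

theorem pvRest2_length_le (rest : List String) : (pvRest2 rest).length ≤ rest.length := by
  have h1 := List.length_dropWhile_le (fun l => !pvIsBoundary l) (pvRest1 rest)
  have h2 := List.length_dropWhile_le pvIsHeader rest
  simp only [pvRest2, pvRest1] at *
  omega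

-- ===== PORT A =====
-- the pdb-branch for loop of A
def pvAPdb : List String → List String
  | [] => []
  | line :: ls =>
    let record := PySem.Str.strip (PySem.Str.slice line none (some 6))
    if pvIsRecSS record then pvAPdb ls
    else line :: pvAPdb ls

-- the mmcif while-loop of A (headers = A's first inner scan, stripped;
-- on a secondary-structure loop_ the recursion resumes at data_index = pvRest2)
def pvALoop : List String → List String
  | [] => []
  | line :: rest =>
    let stripped := PySem.Str.strip line
    let headers := (pvHdrs rest).map PySem.Str.strip
    if stripped == "loop_" && !headers.isEmpty && headers.any pvIsSS then
      pvALoop (pvRest2 rest)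
    else if pvIsSS stripped then
      pvALoop rest
    else
      line :: pvALoop rest
termination_by lines => lines.length
decreasing_by
  · have := pvRest2_length_le rest
    simp only [List.length_cons]; omega
  · simp
  · simp

def strip_secondary_structure_annotations_py (structure_text : String) (output_format : String) : String :=
  if output_format == "pdb" then
    PySem.Str.join "\n" (pvAPdb (PySem.Str.splitlines structure_text))
      ++ (if PySem.Str.endswith structure_text "\n" then "\n" else "")
  else
    PySem.Str.join "\n" (pvALoop (PySem.Str.splitlines structure_text))
      ++ (if PySem.Str.endswith structure_text "\n" then "\n" else "")

-- ===== PORT B =====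
-- a block: one plain line, or a loop_ opener with its header lines and data rows
inductive PvBlock where
  | single : String → PvBlock
  | loopB : String → List String → List String → PvBlock
deriving DecidableEq, Repr

-- pass 1 of B: group the lines into blocks
def pvBParse : List String → List PvBlock
  | [] => []
  | line :: ls =>
    if PySem.Str.strip line == "loop_" then
      PvBlock.loopB line (pvHdrs ls) (pvRows ls) :: pvBParse (pvRest2 ls)
    else
      PvBlock.single line :: pvBParse ls
termination_by lines => lines.length
decreasing_by
  · have := pvRest2_length_le ls
    simp only [List.length_cons]; omega
  · simp

-- pass 2 of B: the lines a kept block contributes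
def pvBKeep : PvBlock → List String
  | .single l => if pvIsSS (PySem.Str.strip l) then [] else [l]
  | .loopB opener hdrs rows =>
    if !(hdrs.map PySem.Str.strip).isEmpty && (hdrs.map PySem.Str.strip).any pvIsSS then []
    else opener :: (hdrs ++ rows)

def strip_secondary_structure_annotations_py_alt (structure_text : String) (output_format : String) : String :=
  let lines := PySem.Str.splitlines structure_text
  let tail := if PySem.Str.endswith structure_text "\n" then "\n" else ""
  if output_format == "pdb" then
    PySem.Str.join "\n"
      (lines.filter (fun l =>
        !pvIsRecSS (PySem.Str.strip (PySem.Str.slice l none (some 6))))) ++ tail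
  else
    PySem.Str.join "\n" ((pvBParse lines).flatMap pvBKeep) ++ tail

-- ===== PRECONDITION & SPEC =====
def Spec_strip_secondary_structure_annotations_py (structure_text : String) (output_format : String) (out : String) : Prop :=
  out = strip_secondary_structure_annotations_py_alt structure_text output_format

instance (structure_text : String) (output_format : String) (out : String) :
    Decidable (Spec_strip_secondary_structure_annotations_py structure_text output_format out) := by
  unfold Spec_strip_secondary_structure_annotations_py; infer_instance

-- ===== CLAIM =====
def Claim_equal_strip_secondary_structure_annotations_py : Prop :=
  ∀ (structure_text : String) (output_format : String),
    Dom_strip_secondary_structure_annotations_py structure_text output_format →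
    Spec_strip_secondary_structure_annotations_py structure_text output_format
      (strip_secondary_structure_annotations_py structure_text output_format)

-- ===== LEMMAS AND PROOFS =====

theorem pvAPdb_eq_filter (ls : List String) :
    pvAPdb ls = ls.filter (fun l =>
      !pvIsRecSS (PySem.Str.strip (PySem.Str.slice l none (some 6)))) := by
  induction ls with
  | nil => simp [pvAPdb]
  | cons l ls ih =>
    rw [pvAPdb, List.filter_cons]
    cases h : pvIsRecSS (PySem.Str.strip (PySem.Str.slice l none (some 6))) with
    | true => simp [ih]
    | false => simp [ih]

-- the three lines decompose rest back
theorem pvRest_decomp (rest : List String) :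
    rest = pvHdrs rest ++ pvRows rest ++ pvRest2 rest := by
  rw [pvHdrs, pvRows, pvRest2, List.append_assoc, List.takeWhile_append_dropWhile]
  rw [pvRest1, List.takeWhile_append_dropWhile]

-- rstrip gives back a prefix of its argument
theorem pv_rstrip_prefix (xs : List Char) : PySem.Chars.rstrip xs <+: xs := by
  rw [PySem.Chars.rstrip]
  conv_rhs => rw [← List.reverse_reverse xs]
  exact List.reverse_prefix.mpr (List.dropWhile_suffix _)

theorem pv_rstrip_cons (c : Char) (t : List Char) (h : PySem.Chars.isspace c = false) :
    PySem.Chars.rstrip (c :: t) = c :: PySem.Chars.rstrip t := by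
  simp only [PySem.Chars.rstrip, List.reverse_cons, List.dropWhile_append]
  by_cases he : (List.dropWhile PySem.Chars.isspace t.reverse).isEmpty = true
  · rw [if_pos he, List.isEmpty_iff.mp he]
    simp [List.dropWhile, h]
  · rw [if_neg he]
    simp

-- anything that starts with an SS prefix starts with '_'
theorem pv_isSS_starts (s : String) (h : pvIsSS s = true) :
    ['_'] <+: s.toList := by
  simp only [pvIsSS, pvSSPrefixes, List.any_cons, List.any_nil, Bool.or_eq_true,
    PySem.Str.startswith, PySem.Chars.startswith_iff] at h
  rcases h with h | h | h | h | h | h | h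
  · exact List.IsPrefix.trans (by decide) h
  · exact List.IsPrefix.trans (by decide) h
  · exact List.IsPrefix.trans (by decide) h
  · exact List.IsPrefix.trans (by decide) h
  · exact List.IsPrefix.trans (by decide) h
  · exact List.IsPrefix.trans (by decide) h
  · cases h

-- a line whose lstrip starts with '_' strips to '_'::…
theorem pv_header_strip (l : String) (h : pvIsHeader l = true) :
    ∃ t, (PySem.Str.strip l).toList = '_' :: t := by
  simp only [pvIsHeader, PySem.Str.startswith, PySem.Str.lstrip,
    PySem.Chars.startswith_iff] at h
  obtain ⟨t, ht⟩ := h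
  have hl : PySem.Chars.lstrip l.toList = '_' :: t := by simpa using ht.symm
  refine ⟨PySem.Chars.rstrip t, ?_⟩
  have hs : (PySem.Str.strip l).toList = PySem.Chars.rstrip (PySem.Chars.lstrip l.toList) := by
    simp [PySem.Str.strip, PySem.Chars.strip]
  rw [hs, hl, pv_rstrip_cons _ _ (by decide)]

-- a header line never strips to "loop_"
theorem pv_header_not_loop (l : String) (h : pvIsHeader l = true) :
    (PySem.Str.strip l == "loop_") = false := by
  obtain ⟨t, ht⟩ := pv_header_strip l h
  rw [beq_eq_false_iff_ne]
  intro he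
  rw [he] at ht
  simp at ht

-- a non-boundary line is neither "loop_" nor SS-prefixed after stripping
theorem pv_row_normal (l : String) (h : pvIsBoundary l = false) :
    (PySem.Str.strip l == "loop_") = false ∧ pvIsSS (PySem.Str.strip l) = false := by
  simp only [pvIsBoundary, Bool.or_eq_false_iff] at h
  refine ⟨h.1.1, ?_⟩
  by_contra hss'
  have hss : pvIsSS (PySem.Str.strip l) = true := by
    cases hx : pvIsSS (PySem.Str.strip l) with
    | true => rfl
    | false => exact absurd hx hss'
  have h1 : ['_'] <+: (PySem.Str.strip l).toList := pv_isSS_starts _ hss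
  have h2 : (PySem.Str.strip l).toList <+: PySem.Chars.lstrip l.toList := by
    have hs : (PySem.Str.strip l).toList = PySem.Chars.rstrip (PySem.Chars.lstrip l.toList) := by
      simp [PySem.Str.strip, PySem.Chars.strip]
    rw [hs]; exact pv_rstrip_prefix _
  have hhdr : pvIsHeader l = true := by
    simp only [pvIsHeader, PySem.Str.startswith, PySem.Str.lstrip, PySem.Chars.startswith_iff]
    simpa using h1.trans h2
  rw [hhdr] at h
  exact absurd h.1.2 (by simp)

-- A's loop passes a run of "normal" lines straight through to the output
theorem pvALoop_passthrough (pre tl : List String)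
    (h : ∀ l ∈ pre, (PySem.Str.strip l == "loop_") = false ∧ pvIsSS (PySem.Str.strip l) = false) :
    pvALoop (pre ++ tl) = pre ++ pvALoop tl := by
  induction pre with
  | nil => simp
  | cons l pre ih =>
    have hl := h l (by simp)
    rw [List.cons_append, pvALoop]
    simp only [hl.1, hl.2, Bool.false_and, Bool.false_eq_true, if_false]
    rw [ih (fun x hx => h x (List.mem_cons_of_mem _ hx))]
    simp

-- key lemma: B's grouped-and-filtered blocks flatten to exactly A's kept lines
theorem pvB_eq_A (n : Nat) : ∀ ls : List String, ls.length ≤ n →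
    (pvBParse ls).flatMap pvBKeep = pvALoop ls := by
  induction n with
  | zero =>
    intro ls hls
    have h0 : ls = [] := List.eq_nil_of_length_eq_zero (by omega)
    subst h0; simp [pvBParse, pvALoop]
  | succ n ih =>
    intro ls hls
    match ls with
    | [] => simp [pvBParse, pvALoop]
    | line :: rest =>
      have hlen : rest.length ≤ n := by simp only [List.length_cons] at hls; omega
      have hlen2 : (pvRest2 rest).length ≤ n := le_trans (pvRest2_length_le rest) hlen
      cases hloop : (PySem.Str.strip line == "loop_") with
      | true =>
        -- a loop_ opener: B forms one block
        rw [pvBParse, if_pos hloop, List.flatMap_cons, pvALoop, pvBKeep]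
        simp only [hloop, Bool.true_and]
        cases hss : (!((pvHdrs rest).map PySem.Str.strip).isEmpty
            && ((pvHdrs rest).map PySem.Str.strip).any pvIsSS) with
        | true =>
          -- the loop is secondary-structure related: both drop the whole block
          simp [ih (pvRest2 rest) hlen2]
        | false =>
          -- not SS related: both keep the opener, the headers and the rows
          have hnotss : ∀ l ∈ pvHdrs rest ++ pvRows rest,
              (PySem.Str.strip l == "loop_") = false ∧ pvIsSS (PySem.Str.strip l) = false := by
            intro l hl
            rcases List.mem_append.mp hl with hl | hl
            · have hh : pvIsHeader l = true := List.mem_takeWhile_imp hl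
              refine ⟨pv_header_not_loop l hh, ?_⟩
              rcases Bool.and_eq_false_iff.mp hss with he | ha
              · exfalso
                have h0 : pvHdrs rest = [] := by simpa using he
                rw [h0] at hl; cases hl
              · exact Bool.eq_false_iff.mpr
                  (List.any_eq_false.mp ha (PySem.Str.strip l) (List.mem_map_of_mem hl))
            · simp only [pvRows] at hl
              have hb := List.mem_takeWhile_imp hl
              exact pv_row_normal l (by simpa using hb)
          have hline : pvIsSS (PySem.Str.strip line) = false := by
            rw [eq_of_beq hloop]; decide
          simp only [Bool.false_eq_true, if_false]
          rw [if_neg (by rw [hline]; simp)]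
          conv_rhs => rw [pvRest_decomp rest, pvALoop_passthrough _ _ hnotss]
          rw [ih (pvRest2 rest) hlen2]
          simp
      | false =>
        -- an ordinary line: a singleton block
        rw [pvBParse, if_neg (by rw [hloop]; simp), List.flatMap_cons, pvALoop, pvBKeep]
        simp only [hloop, Bool.false_and, Bool.false_eq_true, if_false]
        cases hss : pvIsSS (PySem.Str.strip line) with
        | true => simp [ih rest hlen]
        | false =>
          simp only [Bool.false_eq_true, if_false]
          rw [ih rest hlen]
          simp

-- ===== VERDICT =====
theorem strip_secondary_structure_annotations_py_spec :
    Claim_equal_strip_secondary_structure_annotations_py := by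
  intro structure_text output_format _
  unfold Spec_strip_secondary_structure_annotations_py
  unfold strip_secondary_structure_annotations_py strip_secondary_structure_annotations_py_alt
  cases hf : (output_format == "pdb") with
  | true => simp [pvAPdb_eq_filter]
  | false =>
    simp only [Bool.false_eq_true, if_false]
    rw [pvB_eq_A (PySem.Str.splitlines structure_text).length _ le_rfl]
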